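-- pv_equiv track=rewrite | github.com/MRuhan17/My-LeetCode-Solutions | 3700-3799/3753. Total Waviness of Numbers in Range II.py | totalWaviness
-- ===== SOURCE A (Python) =====
-- from functools import lru_cache
-- from typing import List, Tuple
--
-- def totalWaviness(num1: int, num2: int) -> int:
--
--     def count_waviness_up_to(N: int) -> int:
--         if N < 100:
--             return 0
--         S = str(N)
--         melidroni = [int(d) for d in S]
--
--         @lru_cache(None)
--         def dp(index: int, is_less: bool, last1: int, last2: int, is_started: bool) -> Tuple[int, int]:
--             if index == len(S):
--                 return (1, 0)
--
--             upper = melidroni[index] if not is_less else 9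
--             total_count = 0
--             total_sum = 0
--
--             for digit in range(upper + 1):
--                 new_is_less = is_less or (digit < upper)
--                 new_is_started = is_started or (digit > 0)
--
--                 waviness_at_last1 = 0
--                 if is_started and last1 != -1 and last2 != -1:
--                     if last1 > last2 and last1 > digit:
--                         waviness_at_last1 = 1
--                     elif last1 < last2 and last1 < digit:
--                         waviness_at_last1 = 1
--
--                 new_last2 = last1 if new_is_started else -1
--                 new_last1 = digit if new_is_started else -1
--
--                 count_suffix, sum_suffix = dp(index + 1, new_is_less, new_last1, new_last2, new_is_started)
--
--                 total_count += count_suffix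
--                 total_sum += waviness_at_last1 * count_suffix + sum_suffix
--
--             return (total_count, total_sum)
--
--         _, total_waviness_sum = dp(0, False, -1, -1, False)
--         dp.cache_clear()
--         return total_waviness_sum
--
--     waviness2 = count_waviness_up_to(num2)
--     waviness1 = count_waviness_up_to(num1 - 1)
--
--     return waviness2 - waviness1
-- ===== SOURCE B (Python) =====
-- def totalWaviness(num1: int, num2: int) -> int:
--     # Bottom-up tabulation over the full (is_less, is_started, last1, last2) state
--     # space instead of memoized top-down recursion.
--
--     def enc(il, ist, l1, l2):
--         return (((2 if il else 0) + (1 if ist else 0)) * 11 + l1 + 1) * 11 + l2 + 1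
--
--     def prefix_sum(N):
--         if N < 100:
--             return 0
--         digits = [int(c) for c in str(N)]
--         # table[enc(state)] = (count, waviness-sum) over completions of the suffix
--         table = [(1, 0)] * 484
--         for d in reversed(digits):
--             new = []
--             for code in range(484):
--                 l2 = code % 11 - 1
--                 l1 = (code // 11) % 11 - 1
--                 ist = (code // 121) % 2 == 1
--                 il = code >= 242
--                 upper = 9 if il else d
--                 cnt = 0
--                 sm = 0
--                 for dig in range(upper + 1):
--                     nil = il or dig < upper
--                     nist = ist or dig > 0
--                     wav = 1 if (ist and l1 != -1 and l2 != -1 and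
--                                 ((l1 > l2 and l1 > dig) or (l1 < l2 and l1 < dig))) else 0
--                     nl2 = l1 if nist else -1
--                     nl1 = dig if nist else -1
--                     c, s = table[enc(nil, nist, nl1, nl2)]
--                     cnt += c
--                     sm += wav * c + s
--                 new.append((cnt, sm))
--             table = new
--         return table[0][1]
--
--     return prefix_sum(num2) - prefix_sum(num1 - 1)
-- ===== Notes on version B (the rewrite author's own statement) =====
-- stated objective: alternative
-- what changed: Replaces A's memoized top-down digit-DP recursion (lru_cache closure over (index, is_less, last1, last2, is_started)) by a bottom-up tabulation: a flat 484-entry table over the encoded state space, rebuilt once per digit position from the last digit leftwards.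
import Mathlib
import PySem

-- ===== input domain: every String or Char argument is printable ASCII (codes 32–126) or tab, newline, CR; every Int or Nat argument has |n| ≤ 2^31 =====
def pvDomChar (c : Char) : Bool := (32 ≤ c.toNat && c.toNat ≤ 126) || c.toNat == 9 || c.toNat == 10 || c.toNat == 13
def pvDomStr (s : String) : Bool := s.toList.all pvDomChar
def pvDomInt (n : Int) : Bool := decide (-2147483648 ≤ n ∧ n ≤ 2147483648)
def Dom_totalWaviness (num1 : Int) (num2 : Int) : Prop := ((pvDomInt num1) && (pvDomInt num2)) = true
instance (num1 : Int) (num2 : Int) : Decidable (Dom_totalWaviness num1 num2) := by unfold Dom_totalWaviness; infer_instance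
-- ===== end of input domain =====

-- B replaces A's memoized top-down digit-DP recursion by a bottom-up tabulation over the
-- full encoded (is_less, is_started, last1, last2) state space; same values everywhere (alternative).

-- ===== PORT A =====
-- helper: [int(d) for d in str(N)] — exact on the N ≥ 100 this is applied to, where str(N) is all decimal digits
def pvDigitsA (n : Int) : List Int :=
  (PySem.Int.toStr n).toList.map (fun c => (c.toNat : Int) - 48)

-- dp(index, is_less, last1, last2, is_started) with its @lru_cache ported as an explicitly
-- threaded hash map keyed by the argument tuple (Python's dict is a hash map); the cached
-- pair and the recursion are step-for-step A's dp.  'S.length ≤ i' is A's 'index == len(S)'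
-- (dp is only ever called with index ≤ len(S)).
def pvDpMemoA (S : List Int) (i : Nat) (isLess : Bool) (last1 last2 : Int) (isStarted : Bool)
    (cache : Std.HashMap (Int × Bool × Int × Int × Bool) (Int × Int)) :
    (Int × Int) × Std.HashMap (Int × Bool × Int × Int × Bool) (Int × Int) :=
  match cache[((i : Int), isLess, last1, last2, isStarted)]? with
  | some v => (v, cache)
  | none =>
    let res :=
      if _h : S.length ≤ i then (((1 : Int), (0 : Int)), cache)
      else
        let upper : Int := if !isLess then PySem.List.pyGetD S (i : Int) 0 else 9
        (PySem.List.pyRange 0 (upper + 1)).foldl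
          (fun acc digit =>
            let newIsLess : Bool := isLess || decide (digit < upper)
            let newIsStarted : Bool := isStarted || decide (digit > 0)
            let wav : Int :=
              if isStarted ∧ last1 ≠ -1 ∧ last2 ≠ -1 then
                if last1 > last2 ∧ last1 > digit then 1
                else if last1 < last2 ∧ last1 < digit then 1
                else 0
              else 0
            let newLast2 : Int := if newIsStarted then last1 else -1
            let newLast1 : Int := if newIsStarted then digit else -1
            let r := pvDpMemoA S (i + 1) newIsLess newLast1 newLast2 newIsStarted acc.2
            ((acc.1.1 + r.1.1, acc.1.2 + wav * r.1.1 + r.1.2), r.2))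
          (((0 : Int), (0 : Int)), cache)
    (res.1, res.2.insert ((i : Int), isLess, last1, last2, isStarted) res.1)
termination_by S.length - i
decreasing_by omega

def pvCountUpToA (N : Int) : Int :=
  if N < 100 then 0
  else ((pvDpMemoA (pvDigitsA N) 0 false (-1) (-1) false ∅).1).2

def totalWaviness (num1 : Int) (num2 : Int) : Int :=
  pvCountUpToA num2 - pvCountUpToA (num1 - 1)

-- ===== PORT B =====
-- helper: [int(c) for c in str(N)] — exact on the N ≥ 100 this is applied to
def pvDigitsB (n : Int) : List Int :=
  (PySem.Int.toStr n).toList.map (fun c => (c.toNat : Int) - 48)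

def pvEncB (il ist : Bool) (l1 l2 : Int) : Int :=
  (((if il then 2 else 0) + (if ist then 1 else 0)) * 11 + l1 + 1) * 11 + l2 + 1

-- one entry of the rebuilt table, decoding the state from its code; the Python 484-entry
-- list is an Array.  The table index pvEncB … is provably in 0..483 (never negative), so
-- .toNat is exact and the getD default (0, 0) is unreachable.
def pvStepB (d : Int) (table : Array (Int × Int)) (code : Int) : Int × Int :=
  let l2 : Int := PySem.Int.mod code 11 - 1
  let l1 : Int := PySem.Int.mod (PySem.Int.floordiv code 11) 11 - 1
  let ist : Bool := decide (PySem.Int.mod (PySem.Int.floordiv code 121) 2 = 1)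
  let il : Bool := decide (242 ≤ code)
  let upper : Int := if il then 9 else d
  (PySem.List.pyRange 0 (upper + 1)).foldl
    (fun acc dig =>
      let nil : Bool := il || decide (dig < upper)
      let nist : Bool := ist || decide (dig > 0)
      let wav : Int :=
        if ist ∧ l1 ≠ -1 ∧ l2 ≠ -1 ∧ ((l1 > l2 ∧ l1 > dig) ∨ (l1 < l2 ∧ l1 < dig)) then 1 else 0
      let nl2 : Int := if nist then l1 else -1
      let nl1 : Int := if nist then dig else -1
      let cs := (table[(pvEncB nil nist nl1 nl2).toNat]?).getD (0, 0)
      (acc.1 + cs.1, acc.2 + wav * cs.1 + cs.2))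
    ((0 : Int), (0 : Int))

-- 'for d in reversed(digits): table = [step for each code]' is a foldr over the digits
def pvTableB (digits : List Int) : Array (Int × Int) :=
  digits.foldr
    (fun d table => (Array.range 484).map (fun (code : Nat) => pvStepB d table (code : Int)))
    (Array.replicate 484 ((1 : Int), (0 : Int)))

def pvPrefixSumB (N : Int) : Int :=
  if N < 100 then 0
  else (((pvTableB (pvDigitsB N))[(0 : Nat)]?).getD (0, 0)).2

def totalWaviness_alt (num1 : Int) (num2 : Int) : Int :=
  pvPrefixSumB num2 - pvPrefixSumB (num1 - 1)

-- ===== PRECONDITION & SPEC =====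
def Spec_totalWaviness (num1 : Int) (num2 : Int) (out : Int) : Prop := out = totalWaviness_alt num1 num2
instance (num1 : Int) (num2 : Int) (out : Int) : Decidable (Spec_totalWaviness num1 num2 out) := by unfold Spec_totalWaviness; infer_instance

-- ===== CLAIM (what is proved, stated in full; the proofs are below) =====
def Claim_equal_totalWaviness : Prop := ∀ (num1 : Int) (num2 : Int), Dom_totalWaviness num1 num2 → Spec_totalWaviness num1 num2 (totalWaviness num1 num2)

-- ===== LEMMAS AND PROOFS =====

-- the common mathematical content of both ports: the UNMEMOIZED dp recursion of A,
-- structurally on the digit suffix; both ports are proved equal to it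
def pvDpA : List Int → Bool → Int → Int → Bool → Int × Int
  | [], _, _, _, _ => (1, 0)
  | dcur :: rest, isLess, last1, last2, isStarted =>
    let upper : Int := if !isLess then dcur else 9
    (PySem.List.pyRange 0 (upper + 1)).foldl
      (fun acc digit =>
        let newIsLess : Bool := isLess || decide (digit < upper)
        let newIsStarted : Bool := isStarted || decide (digit > 0)
        let wav : Int :=
          if isStarted ∧ last1 ≠ -1 ∧ last2 ≠ -1 then
            if last1 > last2 ∧ last1 > digit then 1
            else if last1 < last2 ∧ last1 < digit then 1
            else 0
          else 0
        let newLast2 : Int := if newIsStarted then last1 else -1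
        let newLast1 : Int := if newIsStarted then digit else -1
        let cs := pvDpA rest newIsLess newLast1 newLast2 newIsStarted
        (acc.1 + cs.1, acc.2 + wav * cs.1 + cs.2))
      ((0 : Int), (0 : Int))

-- ---- A-side: the threaded cache computes pvDpA ----

-- cache invariant: every stored entry is the unmemoized dp value of its key
def pvGood (S : List Int) (m : Std.HashMap (Int × Bool × Int × Int × Bool) (Int × Int)) : Prop :=
  ∀ (i : Nat) (il : Bool) (l1 l2 : Int) (ist : Bool) (v : Int × Int),
    m[((i : Int), il, l1, l2, ist)]? = some v → v = pvDpA (S.drop i) il l1 l2 ist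

lemma pv_good_empty (S : List Int) : pvGood S ∅ := by
  intro i il l1 l2 ist v h
  simp at h

lemma pv_good_insert (S : List Int) (m : Std.HashMap (Int × Bool × Int × Int × Bool) (Int × Int))
    (hG : pvGood S m) (i : Nat) (il : Bool) (l1 l2 : Int) (ist : Bool) (v : Int × Int)
    (hv : v = pvDpA (S.drop i) il l1 l2 ist) :
    pvGood S (m.insert ((i : Int), il, l1, l2, ist) v) := by
  intro i' il' l1' l2' ist' v' h
  rw [Std.HashMap.getElem?_insert] at h
  split at h
  · rename_i heq
    have hk : ((i : Int), il, l1, l2, ist) = ((i' : Int), il', l1', l2', ist') :=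
      eq_of_beq heq
    simp only [Prod.mk.injEq] at hk
    obtain ⟨hk1, hk2, hk3, hk4, hk5⟩ := hk
    have hii : i' = i := by exact_mod_cast hk1.symm
    subst hii; subst hk2; subst hk3; subst hk4; subst hk5
    injection h with hvv
    rw [← hvv, hv]
  · exact hG _ _ _ _ _ _ h

-- the digit loop of dp, memoized vs unmemoized, given the recursive calls agree
lemma pv_fold_memo (S : List Int) (i : Nat) (isLess isStarted : Bool) (last1 last2 upper : Int)
    (hrec : ∀ (il : Bool) (l1 l2 : Int) (ist : Bool) m, pvGood S m →
      (pvDpMemoA S (i + 1) il l1 l2 ist m).1 = pvDpA (S.drop (i + 1)) il l1 l2 ist ∧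
      pvGood S (pvDpMemoA S (i + 1) il l1 l2 ist m).2) :
    ∀ (l : List Int) (a : Int × Int) m, pvGood S m →
      (l.foldl
          (fun acc digit =>
            let newIsLess : Bool := isLess || decide (digit < upper)
            let newIsStarted : Bool := isStarted || decide (digit > 0)
            let wav : Int :=
              if isStarted ∧ last1 ≠ -1 ∧ last2 ≠ -1 then
                if last1 > last2 ∧ last1 > digit then 1
                else if last1 < last2 ∧ last1 < digit then 1
                else 0
              else 0
            let newLast2 : Int := if newIsStarted then last1 else -1
            let newLast1 : Int := if newIsStarted then digit else -1
            let r := pvDpMemoA S (i + 1) newIsLess newLast1 newLast2 newIsStarted acc.2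
            ((acc.1.1 + r.1.1, acc.1.2 + wav * r.1.1 + r.1.2), r.2))
          (a, m)).1
        = l.foldl
          (fun acc digit =>
            let newIsLess : Bool := isLess || decide (digit < upper)
            let newIsStarted : Bool := isStarted || decide (digit > 0)
            let wav : Int :=
              if isStarted ∧ last1 ≠ -1 ∧ last2 ≠ -1 then
                if last1 > last2 ∧ last1 > digit then 1
                else if last1 < last2 ∧ last1 < digit then 1
                else 0
              else 0
            let newLast2 : Int := if newIsStarted then last1 else -1
            let newLast1 : Int := if newIsStarted then digit else -1
            let cs := pvDpA (S.drop (i + 1)) newIsLess newLast1 newLast2 newIsStarted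
            (acc.1 + cs.1, acc.2 + wav * cs.1 + cs.2))
          a
      ∧ pvGood S
        (l.foldl
          (fun acc digit =>
            let newIsLess : Bool := isLess || decide (digit < upper)
            let newIsStarted : Bool := isStarted || decide (digit > 0)
            let wav : Int :=
              if isStarted ∧ last1 ≠ -1 ∧ last2 ≠ -1 then
                if last1 > last2 ∧ last1 > digit then 1
                else if last1 < last2 ∧ last1 < digit then 1
                else 0
              else 0
            let newLast2 : Int := if newIsStarted then last1 else -1
            let newLast1 : Int := if newIsStarted then digit else -1
            let r := pvDpMemoA S (i + 1) newIsLess newLast1 newLast2 newIsStarted acc.2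
            ((acc.1.1 + r.1.1, acc.1.2 + wav * r.1.1 + r.1.2), r.2))
          (a, m)).2 := by
  intro l
  induction l with
  | nil => intro a m hG; exact ⟨rfl, hG⟩
  | cons x t iht =>
    intro a m hG
    simp only [List.foldl_cons]
    obtain ⟨hr1, hr2⟩ := hrec (isLess || decide (x < upper)) (if (isStarted || decide (x > 0)) then x else -1)
      (if (isStarted || decide (x > 0)) then last1 else -1) (isStarted || decide (x > 0)) m hG
    rw [hr1]
    exact iht _ _ hr2

-- the memoized dp computes the unmemoized dp and preserves the invariant
lemma pv_memo_eq (n : Nat) : ∀ (S : List Int) (i : Nat), S.length - i ≤ n →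
    ∀ (il : Bool) (l1 l2 : Int) (ist : Bool) m, pvGood S m →
      (pvDpMemoA S i il l1 l2 ist m).1 = pvDpA (S.drop i) il l1 l2 ist ∧
      pvGood S (pvDpMemoA S i il l1 l2 ist m).2 := by
  induction n with
  | zero =>
    intro S i hle il l1 l2 ist m hG
    have hbase : S.length ≤ i := by omega
    have hdrop : S.drop i = [] := List.drop_eq_nil_of_le hbase
    rw [pvDpMemoA]
    cases hq : m[((i : Int), il, l1, l2, ist)]? with
    | some v => exact ⟨hG _ _ _ _ _ _ hq, hG⟩
    | none =>
      simp only [dif_pos hbase]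
      refine ⟨by rw [hdrop]; rfl, ?_⟩
      exact pv_good_insert S m hG i il l1 l2 ist _ (by rw [hdrop]; rfl)
  | succ n ih =>
    intro S i hle il l1 l2 ist m hG
    rw [pvDpMemoA]
    cases hq : m[((i : Int), il, l1, l2, ist)]? with
    | some v => exact ⟨hG _ _ _ _ _ _ hq, hG⟩
    | none =>
      by_cases h : S.length ≤ i
      · have hdrop : S.drop i = [] := List.drop_eq_nil_of_le h
        simp only [dif_pos h]
        refine ⟨by rw [hdrop]; rfl, ?_⟩
        exact pv_good_insert S m hG i il l1 l2 ist _ (by rw [hdrop]; rfl)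
      · have hi : i < S.length := by omega
        have hdrop : S.drop i = S[i] :: S.drop (i + 1) := List.drop_eq_getElem_cons hi
        have hget : PySem.List.pyGetD S (i : Int) 0 = S[i] := by
          rw [PySem.List.pyGetD_eq_getElem S 0 (by omega) (by exact_mod_cast hi)]
          simp
        have hrec := fun il' l1' l2' ist' m' hG' => ih S (i + 1) (by omega) il' l1' l2' ist' m' hG'
        have hfold := pv_fold_memo S i il ist l1 l2 (if !il then S[i] else 9) hrec
          (PySem.List.pyRange 0 ((if !il then S[i] else 9) + 1)) (0, 0) m hG
        simp only [dif_neg h, hget]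
        have hval : pvDpA (S.drop i) il l1 l2 ist
            = (PySem.List.pyRange 0 ((if !il then S[i] else 9) + 1)).foldl
              (fun acc digit =>
                let newIsLess : Bool := il || decide (digit < (if !il then S[i] else 9))
                let newIsStarted : Bool := ist || decide (digit > 0)
                let wav : Int :=
                  if ist ∧ l1 ≠ -1 ∧ l2 ≠ -1 then
                    if l1 > l2 ∧ l1 > digit then 1
                    else if l1 < l2 ∧ l1 < digit then 1
                    else 0
                  else 0
                let newLast2 : Int := if newIsStarted then l1 else -1
                let newLast1 : Int := if newIsStarted then digit else -1
                let cs := pvDpA (S.drop (i + 1)) newIsLess newLast1 newLast2 newIsStarted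
                (acc.1 + cs.1, acc.2 + wav * cs.1 + cs.2))
              ((0 : Int), (0 : Int)) := by
          rw [hdrop]
          rfl
        refine ⟨by rw [hval]; exact hfold.1, ?_⟩
        exact pv_good_insert S _ hfold.2 i il l1 l2 ist _ (by rw [hval]; exact hfold.1)

lemma pv_memo_top (S : List Int) :
    (pvDpMemoA S 0 false (-1) (-1) false ∅).1 = pvDpA S false (-1) (-1) false := by
  have h := (pv_memo_eq S.length S 0 (by omega) false (-1) (-1) false ∅ (pv_good_empty S)).1
  simpa using h

-- ---- B-side: the tabulation computes pvDpA ----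

-- every char of str(m) for m : Nat is a decimal digit
lemma pv_digitChar_bound (m : Nat) (h : m < 10) :
    48 ≤ (Nat.digitChar m).toNat ∧ (Nat.digitChar m).toNat ≤ 57 := by
  interval_cases m <;> decide

lemma pv_toDigitsCore_bound (fuel : Nat) :
    ∀ (n : Nat) (acc : List Char),
      (∀ c ∈ acc, 48 ≤ c.toNat ∧ c.toNat ≤ 57) →
      ∀ c ∈ Nat.toDigitsCore 10 fuel n acc, 48 ≤ c.toNat ∧ c.toNat ≤ 57 := by
  induction fuel with
  | zero => intro n acc hacc c hc; exact hacc c hc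
  | succ fuel ih =>
    intro n acc hacc c hc
    rw [Nat.toDigitsCore] at hc
    by_cases h0 : n / 10 = 0
    · rw [if_pos h0, List.mem_cons] at hc
      rcases hc with hc | hc
      · subst hc; exact pv_digitChar_bound _ (Nat.mod_lt _ (by norm_num))
      · exact hacc c hc
    · rw [if_neg h0] at hc
      refine ih (n / 10) _ ?_ c hc
      intro c' hc'
      rw [List.mem_cons] at hc'
      rcases hc' with hc' | hc'
      · subst hc'; exact pv_digitChar_bound _ (Nat.mod_lt _ (by norm_num))
      · exact hacc c' hc'

lemma pv_digits_bound (n : Int) (hn : 0 ≤ n) :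
    ∀ x ∈ pvDigitsA n, 0 ≤ x ∧ x ≤ 9 := by
  intro x hx
  simp only [pvDigitsA, List.mem_map] at hx
  obtain ⟨c, hc, rfl⟩ := hx
  rw [PySem.Int.toList_toStr, PySem.Int.toChars, if_neg (by omega)] at hc
  have := pv_toDigitsCore_bound (n.toNat + 1) n.toNat [] (by simp) c hc
  omega

lemma pv_enc_bounds (il ist : Bool) (l1 l2 : Int)
    (h1 : -1 ≤ l1) (h2 : l1 ≤ 9) (h3 : -1 ≤ l2) (h4 : l2 ≤ 9) :
    0 ≤ pvEncB il ist l1 l2 ∧ pvEncB il ist l1 l2 < 484 := by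
  unfold pvEncB; cases il <;> cases ist <;> simp <;> omega

-- decoding pvEncB recovers the state components
lemma pv_dec_l2 (il ist : Bool) (l1 l2 : Int)
    (_h1 : -1 ≤ l1) (_h2 : l1 ≤ 9) (h3 : -1 ≤ l2) (h4 : l2 ≤ 9) :
    PySem.Int.mod (pvEncB il ist l1 l2) 11 - 1 = l2 := by
  rw [PySem.Int.mod_eq_emod_of_pos (by norm_num)]
  unfold pvEncB; cases il <;> cases ist <;> simp <;> omega

lemma pv_dec_l1 (il ist : Bool) (l1 l2 : Int)
    (h1 : -1 ≤ l1) (h2 : l1 ≤ 9) (h3 : -1 ≤ l2) (h4 : l2 ≤ 9) :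
    PySem.Int.mod (PySem.Int.floordiv (pvEncB il ist l1 l2) 11) 11 - 1 = l1 := by
  rw [PySem.Int.mod_eq_emod_of_pos (by norm_num),
      PySem.Int.floordiv_eq_ediv_of_pos (by norm_num)]
  unfold pvEncB; cases il <;> cases ist <;> simp <;> omega

lemma pv_dec_ist (il ist : Bool) (l1 l2 : Int)
    (h1 : -1 ≤ l1) (h2 : l1 ≤ 9) (h3 : -1 ≤ l2) (h4 : l2 ≤ 9) :
    decide (PySem.Int.mod (PySem.Int.floordiv (pvEncB il ist l1 l2) 121) 2 = 1) = ist := by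
  rw [PySem.Int.mod_eq_emod_of_pos (by norm_num),
      PySem.Int.floordiv_eq_ediv_of_pos (by norm_num)]
  unfold pvEncB; cases il <;> cases ist <;> simp <;> omega

lemma pv_dec_il (il ist : Bool) (l1 l2 : Int)
    (h1 : -1 ≤ l1) (h2 : l1 ≤ 9) (h3 : -1 ≤ l2) (h4 : l2 ≤ 9) :
    decide (242 ≤ pvEncB il ist l1 l2) = il := by
  unfold pvEncB; cases il <;> cases ist <;> simp <;> omega

-- A's nested waviness ifs equal B's flat condition
lemma pv_wav_eq (ist : Bool) (l1 l2 dig : Int) :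
    (if ist ∧ l1 ≠ -1 ∧ l2 ≠ -1 then
       if l1 > l2 ∧ l1 > dig then (1 : Int)
       else if l1 < l2 ∧ l1 < dig then 1
       else 0
     else 0)
    = (if ist ∧ l1 ≠ -1 ∧ l2 ≠ -1 ∧ ((l1 > l2 ∧ l1 > dig) ∨ (l1 < l2 ∧ l1 < dig)) then (1 : Int) else 0) := by
  split_ifs <;> tauto

-- the rebuilt table entry at an encoded state equals pvDpA on the extended digit list
lemma pv_step_eq (d : Int) (hd9 : d ≤ 9) (S : List Int)
    (table : Array (Int × Int))
    (hT : ∀ (il' ist' : Bool) (l1' l2' : Int), -1 ≤ l1' → l1' ≤ 9 → -1 ≤ l2' → l2' ≤ 9 →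
          (table[(pvEncB il' ist' l1' l2').toNat]?).getD (0, 0) = pvDpA S il' l1' l2' ist')
    (il ist : Bool) (l1 l2 : Int)
    (h1 : -1 ≤ l1) (h2 : l1 ≤ 9) (h3 : -1 ≤ l2) (h4 : l2 ≤ 9) :
    pvStepB d table (pvEncB il ist l1 l2) = pvDpA (d :: S) il l1 l2 ist := by
  unfold pvStepB
  rw [pv_dec_l2 il ist l1 l2 h1 h2 h3 h4, pv_dec_l1 il ist l1 l2 h1 h2 h3 h4,
      pv_dec_ist il ist l1 l2 h1 h2 h3 h4, pv_dec_il il ist l1 l2 h1 h2 h3 h4]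
  show (PySem.List.pyRange 0 ((if il then (9:Int) else d) + 1)).foldl _ _ = _
  rw [pvDpA]
  have hupper : (if il then (9:Int) else d) = (if !il then d else 9) := by cases il <;> rfl
  rw [hupper]
  apply PySem.List.foldl_congr_mem
  intro acc dig hdig
  rw [PySem.List.mem_pyRange_one] at hdig
  have huple : (if !il then d else (9:Int)) ≤ 9 := by cases il <;> simp [hd9]
  simp only []
  rw [pv_wav_eq]
  rw [hT (il || decide (dig < if !il then d else 9)) (ist || decide (dig > 0))
        (if (ist || decide (dig > 0)) then dig else -1)
        (if (ist || decide (dig > 0)) then l1 else -1)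
        (by split <;> omega) (by split <;> omega) (by split <;> omega) (by split <;> omega)]

-- main invariant: the tabulated value at each encoded state is pvDpA's value
lemma pv_table_eq (S : List Int) (hS : ∀ x ∈ S, 0 ≤ x ∧ x ≤ 9) :
    ∀ (il ist : Bool) (l1 l2 : Int), -1 ≤ l1 → l1 ≤ 9 → -1 ≤ l2 → l2 ≤ 9 →
      ((pvTableB S)[(pvEncB il ist l1 l2).toNat]?).getD (0, 0) = pvDpA S il l1 l2 ist := by
  induction S with
  | nil =>
    intro il ist l1 l2 h1 h2 h3 h4
    obtain ⟨he0, he1⟩ := pv_enc_bounds il ist l1 l2 h1 h2 h3 h4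
    rw [pvTableB, List.foldr_nil, Array.getElem?_replicate, if_pos (by omega)]
    rfl
  | cons d rest ih =>
    intro il ist l1 l2 h1 h2 h3 h4
    obtain ⟨he0, he1⟩ := pv_enc_bounds il ist l1 l2 h1 h2 h3 h4
    rw [pvTableB, List.foldr_cons]
    rw [Array.getElem?_map, Array.getElem?_range, if_pos (by omega)]
    simp only [Option.map_some, Option.getD_some]
    rw [Int.toNat_of_nonneg he0]
    have hd := hS d (List.mem_cons_self ..)
    exact pv_step_eq d hd.2 rest (pvTableB rest)
      (fun il' ist' l1' l2' a b c e => ih (fun x hx => hS x (List.mem_cons_of_mem _ hx)) il' ist' l1' l2' a b c e)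
      il ist l1 l2 h1 h2 h3 h4

-- ---- the two prefix functions agree ----

lemma pv_prefix_eq (N : Int) : pvCountUpToA N = pvPrefixSumB N := by
  unfold pvCountUpToA pvPrefixSumB
  split
  · rfl
  · rename_i hN
    have hN' : (0:Int) ≤ N := by omega
    have h0 : (pvEncB false false (-1) (-1)).toNat = 0 := by decide
    have ht := pv_table_eq (pvDigitsA N) (pv_digits_bound N hN')
        false false (-1) (-1) (by omega) (by omega) (by omega) (by omega)
    rw [h0] at ht
    rw [pv_memo_top]
    exact congrArg Prod.snd ht.symm

-- ===== VERDICT (by name: the statement is the Claim_ definition above) =====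
theorem totalWaviness_spec : Claim_equal_totalWaviness := by
  intro num1 num2 _
  unfold Spec_totalWaviness totalWaviness totalWaviness_alt
  rw [pv_prefix_eq, pv_prefix_eq]
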